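-- pv_equiv track=rewrite | github.com/VictoriaKeshishian/Python_HW | Hw_seminar_3/Task_1.py | find_things
-- ===== SOURCE A (Python) =====
-- def find_things(hike_friends):
--     items_count = {}
--
--     for items in hike_friends.values():
--         for item in items:
--             if item in items_count:
--                 items_count[item] += 1
--             else:
--                 items_count[item] = 1
--
--     missing_items = {}
--     for name, items in hike_friends.items():
--         missing = set()
--         for item in items_count:
--             if items_count[item] == len(hike_friends) - 1 and item not in items:
--                 missing.add(item)
--         if missing:
--             missing_items[name] = missing
--
--     return missing_items
-- ===== SOURCE B (Python) =====
-- def find_things(hike_friends):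
--     n = len(hike_friends)
--     counts = {}
--     holders = {}
--     for i, items in enumerate(hike_friends.values()):
--         for item in items:
--             counts[item] = counts.get(item, 0) + 1
--             s = holders.get(item, set())
--             s.add(i)
--             holders[item] = s
--     missing_lists = [set() for _ in range(n)]
--     for item, c in counts.items():
--         if c == n - 1:
--             h = holders[item]
--             for i in range(n):
--                 if i not in h:
--                     missing_lists[i].add(item)
--     return {name: m for name, m in zip(hike_friends, missing_lists) if m}
-- ===== Notes on version B (the rewrite author's own statement) =====
-- stated objective: faster
-- what changed: Instead of rescanning the whole item-count table for every friend and testing list membership each time, B makes one pass that records both each item's count and the set of friend indices holding it, then adds every count-(n-1) item directly to the missing sets of the complement friends.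
import Mathlib
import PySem

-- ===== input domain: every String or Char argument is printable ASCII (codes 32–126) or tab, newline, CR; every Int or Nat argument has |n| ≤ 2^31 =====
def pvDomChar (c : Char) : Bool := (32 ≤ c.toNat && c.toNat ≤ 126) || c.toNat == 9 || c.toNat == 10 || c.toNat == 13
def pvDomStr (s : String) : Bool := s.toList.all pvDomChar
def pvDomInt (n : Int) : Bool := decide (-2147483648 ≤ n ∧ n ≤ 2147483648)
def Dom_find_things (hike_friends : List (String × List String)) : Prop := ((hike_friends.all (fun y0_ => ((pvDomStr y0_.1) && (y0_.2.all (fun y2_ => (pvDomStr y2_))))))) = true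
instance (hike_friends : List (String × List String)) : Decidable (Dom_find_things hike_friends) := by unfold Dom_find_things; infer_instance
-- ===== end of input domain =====

-- B replaces A's per-friend scan over every counted item (with a list-membership test each
-- time) by one pass that also records which friend indices hold each item, then adds each
-- item of count n-1 directly to the complement friends; objective: faster.

-- ===== PORT A =====
def find_things (hike_friends : List (String × List String)) : List (String × List String) :=
  let items_count : PySem.Dict String Int :=
    hike_friends.foldl (fun d p =>
      p.2.foldl (fun d item =>
        if d.contains item then d.modify item 0 (· + 1) else d.insert item 1) d)
      PySem.Dict.empty
  let missing_items : PySem.Dict String (PySem.Set String) :=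
    hike_friends.foldl (fun md p =>
      let missing : PySem.Set String :=
        items_count.keys.foldl (fun s item =>
          if items_count.getD item 0 = (hike_friends.length : Int) - 1 ∧ item ∉ p.2
          then PySem.Set.add s item else s) PySem.Set.empty
      if missing ≠ [] then md.insert p.1 missing else md)
      PySem.Dict.empty
  missing_items.items

-- ===== PORT B =====
def find_things_alt (hike_friends : List (String × List String)) : List (String × List String) :=
  let n : Int := hike_friends.length
  let cs := (PySem.List.enumerate hike_friends 0).foldl
      (fun (st : PySem.Dict String Int × PySem.Dict String (PySem.Set Int)) q =>
        q.2.2.foldl (fun st item =>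
          (st.1.insert item (st.1.getD item 0 + 1),
           st.2.insert item (PySem.Set.add (st.2.getD item PySem.Set.empty) q.1))) st)
      (PySem.Dict.empty, PySem.Dict.empty)
  let counts := cs.1
  let holders := cs.2
  let ml0 : List (PySem.Set String) := (PySem.List.pyRange 0 n 1).map (fun _ => PySem.Set.empty)
  let missing_lists :=
    counts.items.foldl (fun ml p =>
      if p.2 = n - 1 then
        let h := holders.getD p.1 PySem.Set.empty
        -- missing_lists[i].add(item): every i produced by range(n) satisfies 0 ≤ i < n,
        -- so indexing with i.toNat is exact for Python's missing_lists[i]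
        (PySem.List.pyRange 0 n 1).foldl (fun ml i =>
          if i ∈ h then ml
          else ml.set i.toNat (PySem.Set.add (ml.getD i.toNat PySem.Set.empty) p.1)) ml
      else ml) ml0
  (((hike_friends.map (·.1)).zip missing_lists).foldl (fun md q =>
      if q.2 ≠ [] then md.insert q.1 q.2 else md)
    (PySem.Dict.empty : PySem.Dict String (PySem.Set String))).items

-- ===== PRECONDITION & SPEC =====
def Spec_find_things (hike_friends : List (String × List String)) (out : List (String × List String)) : Prop := out = find_things_alt hike_friends
instance (hike_friends : List (String × List String)) (out : List (String × List String)) : Decidable (Spec_find_things hike_friends out) := by unfold Spec_find_things; infer_instance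

-- ===== CLAIM (what is proved, stated in full; the proofs are below) =====
def Claim_equal_find_things : Prop := ∀ (hike_friends : List (String × List String)), Dom_find_things hike_friends → Spec_find_things hike_friends (find_things hike_friends)

-- ===== LEMMAS AND PROOFS =====

-- the flattened stream of all items, in input order
def pvStream (xs : List (String × List String)) : List String := xs.flatMap (·.2)

-- the holders update for one item of the friend with index j
def pvHoldStep (j : Int) (h : PySem.Dict String (PySem.Set Int)) (it : String) :
    PySem.Dict String (PySem.Set Int) :=
  h.insert it (PySem.Set.add (h.getD it PySem.Set.empty) j)

-- A's counting loop is the Counter of the flattened stream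
theorem pv_countsA (xs : List (String × List String)) :
    xs.foldl (fun d p =>
      p.2.foldl (fun d item =>
        if d.contains item then d.modify item 0 (· + 1) else d.insert item 1) d)
      PySem.Dict.empty = PySem.Dict.counter (pvStream xs) := by
  have hstep : (fun (d : PySem.Dict String Int) item =>
      if d.contains item then d.modify item 0 (· + 1) else d.insert item 1)
      = fun (d : PySem.Dict String Int) item => d.modify item 0 (· + 1) := by
    funext d x
    by_cases h : d.contains x = true
    · simp [h]
    · have hf : d.contains x = false := by simpa using h
      have h0 : d.getD x 0 = 0 := PySem.Dict.getD_of_not_contains _ _ hf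
      simp [hf, PySem.Dict.modify, PySem.Dict.insert, h0]
  rw [hstep, PySem.Dict.counter_eq_foldl, pvStream, List.flatMap_def,
    List.foldl_flatten, List.foldl_map]

-- projecting a fold over a pair state
theorem pv_fst_foldl {α β γ : Type} (l : List γ) (h : α × β → γ → α × β) (f : α → γ → α)
    (hf : ∀ st x, (h st x).1 = f st.1 x) : ∀ p : α × β, (l.foldl h p).1 = l.foldl f p.1 := by
  induction l with
  | nil => intro p; rfl
  | cons a t ih => intro p; simp only [List.foldl_cons, ih, hf]

theorem pv_snd_foldl {α β γ : Type} (l : List γ) (h : α × β → γ → α × β) (g : β → γ → β)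
    (hg : ∀ st x, (h st x).2 = g st.2 x) : ∀ p : α × β, (l.foldl h p).2 = l.foldl g p.2 := by
  induction l with
  | nil => intro p; rfl
  | cons a t ih => intro p; simp only [List.foldl_cons, ih, hg]

-- B's first component is the same Counter
theorem pv_countsB (xs : List (String × List String)) :
    ((PySem.List.enumerate xs 0).foldl
      (fun (st : PySem.Dict String Int × PySem.Dict String (PySem.Set Int)) q =>
        q.2.2.foldl (fun st item =>
          (st.1.insert item (st.1.getD item 0 + 1),
           st.2.insert item (PySem.Set.add (st.2.getD item PySem.Set.empty) q.1))) st)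
      (PySem.Dict.empty, PySem.Dict.empty)).1 = PySem.Dict.counter (pvStream xs) := by
  rw [pv_fst_foldl _ _
      (fun c q => q.2.2.foldl (fun (d : PySem.Dict String Int) x => d.insert x (d.getD x 0 + 1)) c)
      (fun st q => pv_fst_foldl _ _ _ (fun st x => rfl) st)]
  have h2 : (PySem.List.enumerate xs 0).foldl
      (fun (c : PySem.Dict String Int) q => q.2.2.foldl (fun d x => d.insert x (d.getD x 0 + 1)) c)
      PySem.Dict.empty
      = ((PySem.List.enumerate xs 0).map (·.2)).foldl
        (fun c p => p.2.foldl (fun (d : PySem.Dict String Int) x => d.insert x (d.getD x 0 + 1)) c)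
        PySem.Dict.empty := by rw [List.foldl_map]
  rw [h2, PySem.List.map_snd_enumerate]
  rw [← PySem.Dict.foldl_insert_getD_add_one_eq_counter, pvStream, List.flatMap_def,
    List.foldl_flatten, List.foldl_map]

-- B's second component is the holders fold
theorem pv_holdersB (xs : List (String × List String)) :
    ((PySem.List.enumerate xs 0).foldl
      (fun (st : PySem.Dict String Int × PySem.Dict String (PySem.Set Int)) q =>
        q.2.2.foldl (fun st item =>
          (st.1.insert item (st.1.getD item 0 + 1),
           st.2.insert item (PySem.Set.add (st.2.getD item PySem.Set.empty) q.1))) st)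
      (PySem.Dict.empty, PySem.Dict.empty)).2
    = (PySem.List.enumerate xs 0).foldl (fun h q => q.2.2.foldl (pvHoldStep q.1) h)
        PySem.Dict.empty := by
  rw [pv_snd_foldl _ _ (fun h q => q.2.2.foldl (pvHoldStep q.1) h)
      (fun st q => pv_snd_foldl _ _ _ (fun st x => rfl) st)]

-- holders membership after one friend's item list, index j
theorem pv_holders_inner (its : List String) (j : Int) :
    ∀ (h0 : PySem.Dict String (PySem.Set Int)) (item : String) (i : Int),
      i ∈ (its.foldl (pvHoldStep j) h0).getD item PySem.Set.empty ↔
        i ∈ h0.getD item PySem.Set.empty ∨ (i = j ∧ item ∈ its) := by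
  induction its with
  | nil => intro h0 item i; simp
  | cons a t ih =>
    intro h0 item i
    simp only [List.foldl_cons, ih]
    unfold pvHoldStep
    rw [PySem.Dict.getD_insert]
    by_cases hia : item = a
    · subst hia
      simp [PySem.Set.mem_add]
      tauto
    · simp [hia]

-- holders membership: i ∈ holders[item] iff friend number i carries item
theorem pv_holders_mem (l : List (String × List String)) :
    ∀ (s : Int) (h0 : PySem.Dict String (PySem.Set Int)) (item : String) (i : Int),
      i ∈ ((PySem.List.enumerate l s).foldl
            (fun h q => q.2.2.foldl (pvHoldStep q.1) h) h0).getD item PySem.Set.empty ↔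
        i ∈ h0.getD item PySem.Set.empty ∨
          ∃ k : Nat, ∃ _ : k < l.length, i = s + k ∧ item ∈ (l[k]).2 := by
  induction l with
  | nil => intro s h0 item i; simp [PySem.List.enumerate_nil]
  | cons hd tl ih =>
    intro s h0 item i
    rw [PySem.List.enumerate_cons]
    simp only [List.foldl_cons]
    rw [ih (s+1) _ item i, pv_holders_inner]
    constructor
    · rintro ((h0m | ⟨rfl, hmem⟩) | ⟨k, hk, hik, hm⟩)
      · exact Or.inl h0m
      · exact Or.inr ⟨0, by simp, by simp, by simpa using hmem⟩
      · exact Or.inr ⟨k + 1, by simpa using Nat.succ_lt_succ hk,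
          by rw [hik]; push_cast; ring, by simpa using hm⟩
    · rintro (h0m | ⟨k, hk, hik, hm⟩)
      · exact Or.inl (Or.inl h0m)
      · cases k with
        | zero => exact Or.inl (Or.inr ⟨by simpa using hik, by simpa using hm⟩)
        | succ k => exact Or.inr ⟨k, Nat.lt_of_succ_lt_succ (by simpa using hk),
            by rw [hik]; push_cast; ring, by simpa using hm⟩

-- one item's pass over its index list updates each position independently
theorem pv_rangefold (x : String) (h : PySem.Set Int) :
    ∀ (is_ : List Int) (ml : List (PySem.Set String)) (j : Nat), j < ml.length →
      (∀ i ∈ is_, 0 ≤ i) →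
      ((is_.foldl (fun ml i =>
          if i ∈ h then ml
          else ml.set i.toNat (PySem.Set.add (ml.getD i.toNat PySem.Set.empty) x)) ml).getD j PySem.Set.empty)
        = if (j : Int) ∈ is_ ∧ (j : Int) ∉ h then PySem.Set.add (ml.getD j PySem.Set.empty) x
          else ml.getD j PySem.Set.empty := by
  intro is_
  induction is_ with
  | nil => intro ml j hj _; simp
  | cons a t ih =>
    intro ml j hj hpos
    simp only [List.foldl_cons]
    by_cases hah : a ∈ h
    · rw [if_pos hah, ih ml j hj (fun i hi => hpos i (List.mem_cons_of_mem _ hi))]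
      by_cases hja : (j : Int) = a
      · subst hja
        simp [hah]
      · simp only [List.mem_cons]
        by_cases hjt : (j : Int) ∈ t <;> simp [hjt, hja]
    · rw [if_neg hah]
      have ha0 : 0 ≤ a := hpos a (List.mem_cons_self ..)
      have hlen : (ml.set a.toNat (PySem.Set.add (ml.getD a.toNat PySem.Set.empty) x)).length = ml.length := by simp
      rw [ih _ j (by omega) (fun i hi => hpos i (List.mem_cons_of_mem _ hi))]
      by_cases hja : (j : Int) = a
      · have hjn : a.toNat = j := by omega
        have hgd : (ml.set a.toNat (PySem.Set.add (ml.getD a.toNat PySem.Set.empty) x)).getD j PySem.Set.empty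
            = PySem.Set.add (ml.getD j PySem.Set.empty) x := by
          rw [hjn]
          simp [List.getD_eq_getElem?_getD, hj]
        rw [hgd]
        have hmem : (j : Int) ∈ a :: t := by rw [hja]; exact List.mem_cons_self ..
        by_cases hjt : (j : Int) ∈ t
        · simp [hja, hah]
        · simp [hja, hah]
      · have hjn : a.toNat ≠ j := by omega
        have hgd : (ml.set a.toNat (PySem.Set.add (ml.getD a.toNat PySem.Set.empty) x)).getD j PySem.Set.empty
            = ml.getD j PySem.Set.empty := by
          simp [List.getD_eq_getElem?_getD, List.getElem?_set_ne, hjn]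
        rw [hgd]
        simp only [List.mem_cons]
        by_cases hjt : (j : Int) ∈ t <;> simp [hjt, hja]

theorem pv_rangefold_len (x : String) (h : PySem.Set Int) (is_ : List Int) :
    ∀ (ml : List (PySem.Set String)),
      (is_.foldl (fun ml i =>
          if i ∈ h then ml
          else ml.set i.toNat (PySem.Set.add (ml.getD i.toNat PySem.Set.empty) x)) ml).length
        = ml.length := by
  induction is_ with
  | nil => intro ml; rfl
  | cons a t ih => intro ml; simp only [List.foldl_cons]; rw [ih]; split <;> simp

-- the fold over counts.items, read at one position j
theorem pv_itemsfold (hold : PySem.Dict String (PySem.Set Int)) (n : Int) :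
    ∀ (L : List (String × Int)) (ml : List (PySem.Set String)) (j : Nat),
      j < ml.length → ml.length = n.toNat →
      ((L.foldl (fun ml p =>
          if p.2 = n - 1 then
            (PySem.List.pyRange 0 n 1).foldl (fun ml i =>
              if i ∈ hold.getD p.1 PySem.Set.empty then ml
              else ml.set i.toNat (PySem.Set.add (ml.getD i.toNat PySem.Set.empty) p.1)) ml
          else ml) ml).getD j PySem.Set.empty)
        = L.foldl (fun s p =>
            if p.2 = n - 1 ∧ (j : Int) ∉ hold.getD p.1 PySem.Set.empty
            then PySem.Set.add s p.1 else s) (ml.getD j PySem.Set.empty) := by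
  intro L
  induction L with
  | nil => intro ml j hj hlen; rfl
  | cons p L' ih =>
    intro ml j hj hlen
    simp only [List.foldl_cons]
    have hjr : (j : Int) ∈ PySem.List.pyRange 0 n 1 := by
      rw [PySem.List.mem_pyRange_one]
      exact ⟨Int.natCast_nonneg j, by omega⟩
    have hpos : ∀ i ∈ PySem.List.pyRange 0 n 1, 0 ≤ i := by
      intro i hi; rw [PySem.List.mem_pyRange_one] at hi; exact hi.1
    by_cases hc : p.2 = n - 1
    · rw [if_pos hc]
      have hlen1 := pv_rangefold_len p.1 (hold.getD p.1 PySem.Set.empty) (PySem.List.pyRange 0 n 1) ml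
      rw [ih _ j (by omega) (by omega)]
      rw [pv_rangefold p.1 (hold.getD p.1 PySem.Set.empty) _ ml j hj hpos]
      simp [hjr, hc]
    · rw [if_neg hc, ih _ j hj hlen, if_neg (by tauto)]

theorem pv_itemsfold_len (hold : PySem.Dict String (PySem.Set Int)) (n : Int) (L : List (String × Int)) :
    ∀ (ml : List (PySem.Set String)),
      (L.foldl (fun ml p =>
          if p.2 = n - 1 then
            (PySem.List.pyRange 0 n 1).foldl (fun ml i =>
              if i ∈ hold.getD p.1 PySem.Set.empty then ml
              else ml.set i.toNat (PySem.Set.add (ml.getD i.toNat PySem.Set.empty) p.1)) ml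
          else ml) ml).length = ml.length := by
  induction L with
  | nil => intro ml; rfl
  | cons p L' ih =>
    intro ml
    simp only [List.foldl_cons]
    rw [ih]
    split
    · exact pv_rangefold_len p.1 _ _ ml
    · rfl

theorem find_things_spec' (xs : List (String × List String)) :
    find_things xs = find_things_alt xs := by
  simp only [find_things, find_things_alt, pv_countsA, pv_countsB, pv_holdersB]
  set n : Int := (xs.length : Int) with hn
  set C : PySem.Dict String Int := PySem.Dict.counter (pvStream xs) with hCdef
  set hold : PySem.Dict String (PySem.Set Int) :=
    (PySem.List.enumerate xs 0).foldl (fun h q => q.2.2.foldl (pvHoldStep q.1) h)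
      PySem.Dict.empty with hholddef
  set missA : (String × List String) → PySem.Set String := fun p =>
    C.keys.foldl (fun s item =>
      if C.getD item 0 = n - 1 ∧ item ∉ p.2 then PySem.Set.add s item else s)
      PySem.Set.empty with hmissA
  set ml0 : List (PySem.Set String) := (PySem.List.pyRange 0 n 1).map (fun _ => PySem.Set.empty) with hml0
  set ML : List (PySem.Set String) :=
    C.items.foldl (fun ml p =>
      if p.2 = n - 1 then
        (PySem.List.pyRange 0 n 1).foldl (fun ml i =>
          if i ∈ hold.getD p.1 PySem.Set.empty then ml
          else ml.set i.toNat (PySem.Set.add (ml.getD i.toNat PySem.Set.empty) p.1)) ml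
      else ml) ml0 with hML
  have hml0len : ml0.length = n.toNat := by
    rw [hml0, List.length_map, PySem.List.length_pyRange_one]; norm_num
  have hMLlen : ML.length = n.toNat := by rw [hML, pv_itemsfold_len, hml0len]
  have hnt : n.toNat = xs.length := by omega
  -- rewrite the A-side fold as a fold over a mapped list
  rw [show (xs.foldl (fun md p =>
        if missA p ≠ [] then md.insert p.1 (missA p) else md)
        (PySem.Dict.empty : PySem.Dict String (PySem.Set String)))
      = (xs.map (fun p => (p.1, missA p))).foldl (fun md q =>
          if q.2 ≠ [] then md.insert q.1 q.2 else md)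
        (PySem.Dict.empty : PySem.Dict String (PySem.Set String)) from by rw [List.foldl_map]]
  congr 1
  congr 1
  -- the two pair lists coincide entrywise
  apply List.ext_getElem
  · simp [hMLlen, hnt]
  intro j hj1 hj2
  have hjx : j < xs.length := by simpa using hj1
  have hjM : j < ML.length := by omega
  rw [List.getElem_map, List.getElem_zip, List.getElem_map]
  have hml0j : ml0.getD j PySem.Set.empty = PySem.Set.empty := by
    rw [hml0, List.getD_eq_getElem?_getD, List.getElem?_map]
    cases (PySem.List.pyRange 0 n)[j]? <;> rfl
  -- ML at position j = missA xs[j]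
  have hfinal : ML.getD j PySem.Set.empty = missA (xs[j]) := by
    rw [hML, pv_itemsfold hold n C.items ml0 j (by omega) hml0len, hml0j]
    rw [PySem.Dict.items_eq_map_keys C (PySem.Dict.nodup_keys_counter _) 0, List.foldl_map]
    -- pointwise condition equality
    have hiff : ∀ k : String, ((j : Int) ∉ hold.getD k PySem.Set.empty ↔ k ∉ (xs[j]).2) := by
      intro k
      rw [hholddef, pv_holders_mem xs 0 PySem.Dict.empty k (j : Int)]
      have hemp : ((j : Int) ∈ (PySem.Dict.empty : PySem.Dict String (PySem.Set Int)).getD k PySem.Set.empty) ↔ False := by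
        simp [PySem.Dict.getD_empty, PySem.Set.empty]
      rw [hemp, false_or]
      constructor
      · intro hne hmem
        exact hne ⟨j, hjx, by omega, hmem⟩
      · rintro hnm ⟨m, hm, hjm, hmem⟩
        have : m = j := by omega
        subst this
        exact hnm hmem
    have hstep : (fun (s : PySem.Set String) (k : String) =>
          if C.getD k 0 = n - 1 ∧ (j : Int) ∉ hold.getD k PySem.Set.empty
          then PySem.Set.add s k else s)
        = fun s k => if C.getD k 0 = n - 1 ∧ k ∉ (xs[j]).2 then PySem.Set.add s k else s := by
      funext s k
      exact if_congr (and_congr Iff.rfl (hiff k)) rfl rfl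
    rw [hstep, hmissA]
  refine Prod.ext rfl ?_
  show missA xs[j] = ML[j]
  exact hfinal.symm.trans (List.getD_eq_getElem ML _ hjM)

-- ===== VERDICT (by name: the statement is the Claim_ definition above) =====
theorem find_things_spec : Claim_equal_find_things := by
  intro xs _
  unfold Spec_find_things
  exact find_things_spec' xs
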